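-- pv_equiv track=rewrite | github.com/yashhR/competitive | Edyst/Kadane'sAlgo.py | maxTill
-- ===== SOURCE A (Python) =====
-- def maxTill(idx, ar):
--     if idx == 0:
--         return ar[idx]
--     else:
--         if idx in dict.keys():
--             return dict[idx]
--         else:
--             return max(ar[idx] + maxTill(idx - 1, ar), ar[idx])
--
-- dict = {}
-- ===== SOURCE B (Python) =====
-- def maxTill(idx, ar):
--     prefix = ar[:idx + 1]
--     cur = prefix[0]
--     for x in prefix[1:]:
--         cur = max(x + cur, x)
--     return cur
-- ===== Notes on version B (the rewrite author's own statement) =====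
-- stated objective: simpler
-- what changed: Replaced the top-down recursion with an (always-empty) module-level memo dict by a bottom-up sweep over the prefix slice ar[:idx+1] carrying a single accumulator, removing the recursion, the index arithmetic and the dict lookups.
import Mathlib
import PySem

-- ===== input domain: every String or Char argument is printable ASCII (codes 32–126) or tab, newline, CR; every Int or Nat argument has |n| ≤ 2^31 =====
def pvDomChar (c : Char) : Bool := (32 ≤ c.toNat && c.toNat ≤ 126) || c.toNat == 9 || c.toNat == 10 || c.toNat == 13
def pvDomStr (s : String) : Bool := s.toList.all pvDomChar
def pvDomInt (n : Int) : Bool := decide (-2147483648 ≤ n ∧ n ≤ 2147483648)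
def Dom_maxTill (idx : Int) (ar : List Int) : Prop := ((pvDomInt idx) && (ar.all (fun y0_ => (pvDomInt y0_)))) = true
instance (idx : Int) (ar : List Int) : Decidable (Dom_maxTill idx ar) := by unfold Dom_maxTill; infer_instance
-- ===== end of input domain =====

-- B replaces A's top-down recursion with its always-empty memo dict by a bottom-up
-- sweep over the prefix slice ar[:idx+1] with one accumulator: simpler.

-- ===== PORT A =====
-- A's module-level memo `dict = {}` is never written, so it is the empty dict.
def pvADict : PySem.Dict Int Int := PySem.Dict.empty

-- the recursion of A, on the Nat height idx.toNat (Python raises for negative idx: outside Pre_)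
def maxTillGo (ar : List Int) : Nat → Int
  | 0 => PySem.List.pyGetD ar 0 0
  | n + 1 =>
    match PySem.Dict.get? pvADict ((n : Int) + 1) with
    | some v => v
    | none =>
        max (PySem.List.pyGetD ar ((n : Int) + 1) 0 + maxTillGo ar n)
            (PySem.List.pyGetD ar ((n : Int) + 1) 0)

def maxTill (idx : Int) (ar : List Int) : Int := maxTillGo ar idx.toNat

-- ===== PORT B =====
def maxTill_alt (idx : Int) (ar : List Int) : Int :=
  let pfx := PySem.List.slice ar none (some (idx + 1))   -- ar[:idx+1]
  let cur := PySem.List.pyGetD pfx 0 0                   -- prefix[0] (IndexError outside Pre_)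
  (PySem.List.slice pfx (some 1) none).foldl             -- for x in prefix[1:]
    (fun cur x => max (x + cur) x) cur

-- ===== PRECONDITION & SPEC =====
-- Pre_ excludes inputs on which Python A raises: idx < 0 (unbounded recursion ending in
-- IndexError/RecursionError) and idx ≥ len(ar) (IndexError, also for empty ar).
def Pre_maxTill (idx : Int) (ar : List Int) : Prop := 0 ≤ idx ∧ idx < ar.length
instance (idx : Int) (ar : List Int) : Decidable (Pre_maxTill idx ar) := by
  unfold Pre_maxTill; infer_instance

def pvWitness_maxTill : Int × List Int := (2, [1, -5, 3])

def Spec_maxTill (idx : Int) (ar : List Int) (out : Int) : Prop := out = maxTill_alt idx ar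
instance (idx : Int) (ar : List Int) (out : Int) : Decidable (Spec_maxTill idx ar out) := by
  unfold Spec_maxTill; infer_instance

-- ===== CLAIM =====
def Claim_equal_maxTill : Prop := ∀ (idx : Int) (ar : List Int), Dom_maxTill idx ar → Pre_maxTill idx ar → Spec_maxTill idx ar (maxTill idx ar)

-- ===== LEMMAS AND PROOFS =====

-- A's recursion equals B's fold over the values of the prefix, for every in-range height n
lemma maxTillGo_eq_fold (ar : List Int) (n : Nat) (hn : n < ar.length) :
    maxTillGo ar n =
      ((ar.take (n + 1)).tail).foldl (fun cur x => max (x + cur) x)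
        (PySem.List.pyGetD (ar.take (n + 1)) 0 0) := by
  induction n with
  | zero =>
      cases ar with
      | nil => simp at hn
      | cons a t => simp [maxTillGo, PySem.List.pyGetD_zero]
  | succ n ih =>
      have hn' : n < ar.length := by omega
      have htake : ar.take (n + 1 + 1) = ar.take (n + 1) ++ [ar[n + 1]] :=
        List.take_succ_eq_append_getElem (by omega)
      have hlen : (ar.take (n + 1)).length = n + 1 := by
        simp [List.length_take]; omega
      have htail : (ar.take (n + 1 + 1)).tail = (ar.take (n + 1)).tail ++ [ar[n + 1]] := by
        rw [htake]
        cases h : ar.take (n + 1) with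
        | nil => simp [h] at hlen
        | cons a t => simp
      have hhead : PySem.List.pyGetD (ar.take (n + 1 + 1)) 0 0
          = PySem.List.pyGetD (ar.take (n + 1)) 0 0 := by
        rw [htake]
        cases h : ar.take (n + 1) with
        | nil => simp [h] at hlen
        | cons a t => simp [PySem.List.pyGetD_zero]
      have hget : PySem.List.pyGetD ar ((n : Int) + 1) 0 = ar[n + 1] := by
        have : PySem.List.pyGetD ar (((n + 1 : Nat) : Int)) 0 = ar.getD (n + 1) 0 :=
          PySem.List.pyGetD_natCast ..
        simpa [List.getD, List.getElem?_eq_getElem hn] using this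
      simp only [maxTillGo, pvADict]
      rw [show PySem.Dict.get? (PySem.Dict.empty : PySem.Dict Int Int) ((n : Int) + 1) = none
        from rfl]
      rw [htail, hhead, List.foldl_append, ← ih hn', hget]
      simp [List.foldl]

-- ===== VERDICT =====
theorem maxTill_spec : Claim_equal_maxTill := by
  intro idx ar _ hpre
  obtain ⟨h0, hlt⟩ := hpre
  unfold Spec_maxTill maxTill maxTill_alt
  have hn : idx.toNat < ar.length := by omega
  have hslice : PySem.List.slice ar none (some (idx + 1)) = ar.take (idx.toNat + 1) := by
    have := PySem.List.slice_to (xs := ar) (b := idx + 1) (by omega)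
    rw [this]
    congr 1
    omega
  simp only [hslice, PySem.List.slice_from_one]
  exact maxTillGo_eq_fold ar idx.toNat hn
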